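-- pv_equiv track=rewrite | github.com/pranay2704/leetcode | Maximum subarray sum 2.py | maxSubarrSum
-- ===== SOURCE A (Python) =====
-- def maxSubarrSum(arr, a, b):
--     # code here
--     vis=[ 0 for _ in range(len(arr)) ]
--     total=sum(arr[:a-1])
--     vis[0]=total
--     max_total=-100001
--     for i in range(a,b+1):
--         total=vis[0]+arr[i-1]
--         vis[0]=total
--         if total>max_total:
--                 max_total=total
--         for j in range(1,len(arr)-i+1):
--             total=vis[j-1]+arr[j+i-1]-arr[j-1]
--             vis[j]=total
--             if total>max_total:
--                 max_total=total
--
--     return max_total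
-- ===== SOURCE B (Python) =====
-- def maxSubarrSum(arr, a, b):
--     # Prefix sums + sliding-window minimum (monotonic queue): one pass over the array.
--     n = len(arr)
--     pref = [0]
--     for x in arr:
--         pref.append(pref[-1] + x)
--     best = -100001
--     dq = []      # indices l with pref[l] strictly increasing; active part is dq[head:]
--     head = 0
--     for r in range(1, n + 1):
--         l = r - a
--         if l >= 0:
--             while len(dq) > head and pref[dq[-1]] >= pref[l]:
--                 dq.pop()
--             dq.append(l)
--         while len(dq) > head and dq[head] < r - b:
--             head += 1
--         if len(dq) > head:
--             s = pref[r] - pref[dq[head]]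
--             if s > best:
--                 best = s
--     return best
-- ===== Notes on version B (the rewrite author's own statement) =====
-- stated objective: alternative
-- what changed: Replaces the per-length rolling-window table (one full pass over the array for every window length in [a,b]) by prefix sums with a sliding-window minimum maintained in a monotonic queue, a single pass over the array.
-- crash fix: A raises IndexError on empty arr, on a = 0 with b >= 0, and on a <= b with b > len(arr); B there returns the maximum sum over the window lengths that actually exist (the function's own sentinel -100001 if there are none). — e.g. on maxSubarrSum([1], 0, 0): A raises IndexError, B returns 0
import Mathlib
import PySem

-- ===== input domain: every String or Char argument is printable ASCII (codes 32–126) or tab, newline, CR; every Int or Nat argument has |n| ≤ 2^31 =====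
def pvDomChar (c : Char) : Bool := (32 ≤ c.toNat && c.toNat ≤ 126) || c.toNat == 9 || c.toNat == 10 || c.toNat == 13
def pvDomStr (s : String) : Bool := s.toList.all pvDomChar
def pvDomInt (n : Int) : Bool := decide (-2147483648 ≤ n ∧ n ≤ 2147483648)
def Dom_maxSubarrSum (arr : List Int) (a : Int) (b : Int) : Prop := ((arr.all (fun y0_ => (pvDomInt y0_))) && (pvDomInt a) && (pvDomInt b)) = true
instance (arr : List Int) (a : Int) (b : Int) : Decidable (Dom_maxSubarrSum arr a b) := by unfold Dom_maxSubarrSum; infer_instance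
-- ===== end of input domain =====

-- B replaces A's per-length window rescan by prefix sums plus a monotonic-queue sliding-window
-- minimum (objective: alternative algorithm); proved equal to A on exactly the inputs where A returns.

-- ===== PORT A =====
def maxSubarrSum (arr : List Int) (a : Int) (b : Int) : Int :=
  let vis : List Int := (PySem.List.pyRange 0 (PySem.List.len arr) 1).map (fun _ => 0)
  let total : Int := (PySem.List.slice arr none (some (a - 1))).sum
  let vis := PySem.List.pySetD vis 0 total
  let st :=
    (PySem.List.pyRange a (b + 1) 1).foldl
      (fun (st : List Int × Int) i =>
        let total := PySem.List.pyGetD st.1 0 0 + PySem.List.pyGetD arr (i - 1) 0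
        let vis := PySem.List.pySetD st.1 0 total
        let m := if total > st.2 then total else st.2
        (PySem.List.pyRange 1 (PySem.List.len arr - i + 1) 1).foldl
          (fun (st2 : List Int × Int) j =>
            let total := PySem.List.pyGetD st2.1 (j - 1) 0 + PySem.List.pyGetD arr (j + i - 1) 0
              - PySem.List.pyGetD arr (j - 1) 0
            (PySem.List.pySetD st2.1 j total, if total > st2.2 then total else st2.2))
          (vis, m))
      (vis, -100001)
  st.2

-- ===== PORT B =====
-- 'while len(dq) > head and pref[dq[-1]] >= pref[l]: dq.pop()' — fuel (initial dq length) only makes it total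
def pvPopBack (pref : List Int) (pl : Int) (head : Nat) : Nat → List Int → List Int
  | 0, dq => dq
  | fuel + 1, dq =>
      if head < dq.length ∧ pl ≤ PySem.List.pyGetD pref (PySem.List.pyGetD dq (-1) 0) 0 then
        pvPopBack pref pl head fuel dq.dropLast
      else dq

-- 'while len(dq) > head and dq[head] < r - b: head += 1' — fuel only makes it total
def pvAdvance (dq : List Int) (cut : Int) : Nat → Nat → Nat
  | 0, head => head
  | fuel + 1, head =>
      if head < dq.length ∧ PySem.List.pyGetD dq (head : Int) 0 < cut then
        pvAdvance dq cut fuel (head + 1)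
      else head

def maxSubarrSum_alt (arr : List Int) (a : Int) (b : Int) : Int :=
  let n := PySem.List.len arr
  let pref := arr.foldl (fun p x => p ++ [PySem.List.pyGetD p (-1) 0 + x]) [0]
  let st :=
    (PySem.List.pyRange 1 (n + 1) 1).foldl
      (fun (st : List Int × Nat × Int) r =>
        let l := r - a
        let dq :=
          if 0 ≤ l then
            pvPopBack pref (PySem.List.pyGetD pref l 0) st.2.1 st.1.length st.1 ++ [l]
          else st.1
        let head := pvAdvance dq (r - b) dq.length st.2.1
        let best :=
          if head < dq.length then
            let s := PySem.List.pyGetD pref r 0 -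
              PySem.List.pyGetD pref (PySem.List.pyGetD dq (head : Int) 0) 0
            if s > st.2.2 then s else st.2.2
          else st.2.2
        (dq, head, best))
      ([], 0, -100001)
  st.2.2

-- ===== PRECONDITION & SPEC =====
-- Pre_ admits exactly the inputs on which A returns; on every other input A raises IndexError
-- (empty arr; a ≤ 0 with a ≤ b, where the inner loop writes vis[len(arr)]; a ≤ b with b > len(arr)).
def Pre_maxSubarrSum (arr : List Int) (a : Int) (b : Int) : Prop :=
  arr ≠ [] ∧ (b < a ∨ (1 ≤ a ∧ b ≤ (arr.length : Int)))
instance (arr : List Int) (a : Int) (b : Int) : Decidable (Pre_maxSubarrSum arr a b) := by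
  unfold Pre_maxSubarrSum; infer_instance
def pvWitness_maxSubarrSum : List Int × Int × Int := ([1, 2], 1, 2)

-- A raises IndexError on empty arr, on a = 0 with 0 ≤ b, and on 1 ≤ a ≤ b with b > len(arr);
-- B there returns the maximum over the window lengths that actually exist (-100001 if none).
def Raises_maxSubarrSum (arr : List Int) (a : Int) (b : Int) : Prop :=
  arr = [] ∨ (a = 0 ∧ 0 ≤ b) ∨ (1 ≤ a ∧ a ≤ b ∧ (arr.length : Int) < b)
instance (arr : List Int) (a : Int) (b : Int) : Decidable (Raises_maxSubarrSum arr a b) := by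
  unfold Raises_maxSubarrSum; infer_instance
def pvRaiseWitness_maxSubarrSum : List Int × Int × Int := ([1], 0, 0)
def pvRaiseWitnessOut_maxSubarrSum : Int := 0

def Spec_maxSubarrSum (arr : List Int) (a : Int) (b : Int) (out : Int) : Prop :=
  out = maxSubarrSum_alt arr a b
instance (arr : List Int) (a : Int) (b : Int) (out : Int) : Decidable (Spec_maxSubarrSum arr a b out) := by
  unfold Spec_maxSubarrSum; infer_instance

-- ===== CLAIM (what is proved, stated in full; the proofs are below) =====
def Claim_equal_maxSubarrSum : Prop := ∀ (arr : List Int) (a : Int) (b : Int), Dom_maxSubarrSum arr a b → Pre_maxSubarrSum arr a b → Spec_maxSubarrSum arr a b (maxSubarrSum arr a b)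
def Claim_raises_maxSubarrSum : Prop := (∀ (arr : List Int) (a : Int) (b : Int), Dom_maxSubarrSum arr a b → Raises_maxSubarrSum arr a b → ¬ Pre_maxSubarrSum arr a b) ∧ (Dom_maxSubarrSum (pvRaiseWitness_maxSubarrSum.1) (pvRaiseWitness_maxSubarrSum.2.1) (pvRaiseWitness_maxSubarrSum.2.2) ∧ Raises_maxSubarrSum (pvRaiseWitness_maxSubarrSum.1) (pvRaiseWitness_maxSubarrSum.2.1) (pvRaiseWitness_maxSubarrSum.2.2) ∧ maxSubarrSum_alt (pvRaiseWitness_maxSubarrSum.1) (pvRaiseWitness_maxSubarrSum.2.1) (pvRaiseWitness_maxSubarrSum.2.2) = pvRaiseWitnessOut_maxSubarrSum)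

-- ===== LEMMAS AND PROOFS =====

-- P k = sum of the first k elements (Python prefix sum)
def pvP (arr : List Int) (k : Int) : Int := (arr.take k.toNat).sum

-- the windows both programs range over: sum = P r - P l, window length r - l in [a, b]
def pvCand (n a b l r : Int) : Prop := 0 ≤ l ∧ a ≤ r - l ∧ r - l ≤ b ∧ r ≤ n

-- characterisation shared by both programs: m is at least the sentinel, dominates every window
-- sum, and is attained (or is the sentinel)
def pvGood (arr : List Int) (a b m : Int) : Prop :=
  -100001 ≤ m ∧
  (∀ l r, pvCand (arr.length : Int) a b l r → pvP arr r - pvP arr l ≤ m) ∧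
  (m = -100001 ∨ ∃ l r, pvCand (arr.length : Int) a b l r ∧ m = pvP arr r - pvP arr l)

theorem pvGood_unique {arr : List Int} {a b m m' : Int}
    (h : pvGood arr a b m) (h' : pvGood arr a b m') : m = m' := by
  obtain ⟨h1, h2, h3⟩ := h
  obtain ⟨h1', h2', h3'⟩ := h'
  apply le_antisymm
  · rcases h3 with rfl | ⟨l, r, hc, rfl⟩
    · exact h1'
    · exact h2' l r hc
  · rcases h3' with rfl | ⟨l, r, hc, rfl⟩
    · exact h1
    · exact h2 l r hc

theorem pvP_zero (arr : List Int) : pvP arr 0 = 0 := rfl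

theorem pvGet_eq (arr : List Int) (k : Int) (h0 : 0 ≤ k) (hk : k < (arr.length : Int)) :
    PySem.List.pyGetD arr k 0 = pvP arr (k + 1) - pvP arr k := by
  have hk' : k.toNat < arr.length := by omega
  have h1 : (k + 1).toNat = k.toNat + 1 := by omega
  have h2 := PySem.List.pyGetD_eq_getElem (xs := arr) (d := 0) h0 (by simpa using hk)
  rw [h2]
  unfold pvP
  rw [h1, List.sum_take_succ _ _ hk']
  ring

-- ----- A side -----


def pvAInner (arr : List Int) (i : Int) (st2 : List Int × Int) (j : Int) : List Int × Int :=
  let total := PySem.List.pyGetD st2.1 (j - 1) 0 + PySem.List.pyGetD arr (j + i - 1) 0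
    - PySem.List.pyGetD arr (j - 1) 0
  (PySem.List.pySetD st2.1 j total, if total > st2.2 then total else st2.2)
def pvAOuter (arr : List Int) (st : List Int × Int) (i : Int) : List Int × Int :=
  let total := PySem.List.pyGetD st.1 0 0 + PySem.List.pyGetD arr (i - 1) 0
  let vis := PySem.List.pySetD st.1 0 total
  let m := if total > st.2 then total else st.2
  (PySem.List.pyRange 1 (PySem.List.len arr - i + 1) 1).foldl (pvAInner arr i) (vis, m)

theorem pvA_eq_fold (arr : List Int) (a b : Int) :
    maxSubarrSum arr a b =
      ((PySem.List.pyRange a (b + 1) 1).foldl (pvAOuter arr)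
        (PySem.List.pySetD ((PySem.List.pyRange 0 (PySem.List.len arr) 1).map (fun _ => 0)) 0
          ((PySem.List.slice arr none (some (a - 1))).sum), -100001)).2 := rfl

theorem pvA_inner_spec (arr : List Int) (i : Int) (hi : 1 ≤ i) (e : Int)
    (he : e ≤ (arr.length : Int) - i + 1) :
    ∀ (k : Nat) (s : Int) (vis : List Int) (m : Int), (e - s).toNat ≤ k → 1 ≤ s →
    vis.length = arr.length →
    PySem.List.pyGetD vis (s - 1) 0 = pvP arr (s - 1 + i) - pvP arr (s - 1) →
    (((PySem.List.pyRange s e 1).foldl (pvAInner arr i) (vis, m)).1.length = arr.length ∧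
     PySem.List.pyGetD ((PySem.List.pyRange s e 1).foldl (pvAInner arr i) (vis, m)).1 0 0 =
       PySem.List.pyGetD vis 0 0) ∧
    m ≤ ((PySem.List.pyRange s e 1).foldl (pvAInner arr i) (vis, m)).2 ∧
    (∀ j, s ≤ j → j < e →
      pvP arr (j + i) - pvP arr j ≤ ((PySem.List.pyRange s e 1).foldl (pvAInner arr i) (vis, m)).2) ∧
    (((PySem.List.pyRange s e 1).foldl (pvAInner arr i) (vis, m)).2 = m ∨
      ∃ j, s ≤ j ∧ j < e ∧
        ((PySem.List.pyRange s e 1).foldl (pvAInner arr i) (vis, m)).2 = pvP arr (j + i) - pvP arr j) := by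
  intro k
  induction k with
  | zero =>
    intro s vis m hk hs hlen hvis
    have : e ≤ s := by omega
    rw [PySem.List.pyRange_one_eq_nil this]
    exact ⟨⟨hlen, rfl⟩, le_refl _, fun j h1 h2 => by omega, Or.inl rfl⟩
  | succ k ih =>
    intro s vis m hk hs hlen hvis
    by_cases hse : e ≤ s
    · rw [PySem.List.pyRange_one_eq_nil hse]
      exact ⟨⟨hlen, rfl⟩, le_refl _, fun j h1 h2 => by omega, Or.inl rfl⟩
    · replace hse : s < e := by omega
      rw [PySem.List.pyRange_one_cons hse, List.foldl_cons]
      have hsN : s < (arr.length : Int) := by omega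
      have ha1 : PySem.List.pyGetD arr (s + i - 1) 0 = pvP arr (s + i) - pvP arr (s + i - 1) := by
        have h := pvGet_eq arr (s + i - 1) (by omega) (by omega)
        have h2 : s + i - 1 + 1 = s + i := by ring
        rwa [h2] at h
      have ha2 : PySem.List.pyGetD arr (s - 1) 0 = pvP arr s - pvP arr (s - 1) := by
        have h := pvGet_eq arr (s - 1) (by omega) (by omega)
        have h2 : s - 1 + 1 = s := by ring
        rwa [h2] at h
      have hstep : pvAInner arr i (vis, m) s =
          (vis.set s.toNat (pvP arr (s + i) - pvP arr s),
           if pvP arr (s + i) - pvP arr s > m then pvP arr (s + i) - pvP arr s else m) := by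
        unfold pvAInner
        simp only
        rw [hvis, ha1, ha2, PySem.List.pySetD_of_nonneg _ _ (by omega)]
        have h3 : s - 1 + i = s + i - 1 := by ring
        rw [h3]
        have h4 : pvP arr (s + i - 1) - pvP arr (s - 1) + (pvP arr (s + i) - pvP arr (s + i - 1))
            - (pvP arr s - pvP arr (s - 1)) = pvP arr (s + i) - pvP arr s := by ring
        rw [h4]
      rw [hstep]
      set t := pvP arr (s + i) - pvP arr s with ht
      set m' := if t > m then t else m with hm'
      have hlen' : (vis.set s.toNat t).length = arr.length := by simp [hlen]
      have hvis' : PySem.List.pyGetD (vis.set s.toNat t) (s + 1 - 1) 0 =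
          pvP arr (s + 1 - 1 + i) - pvP arr (s + 1 - 1) := by
        have h5 : s + 1 - 1 = s := by ring
        rw [h5]
        rw [PySem.List.pyGetD_eq_getElem _ _ (by omega) (by rw [Nat.cast_inj.mpr hlen'] at *; omega)]
        rw [List.getElem_set_self]
      obtain ⟨⟨il, ig0⟩, imono, icov, iatt⟩ := ih (s + 1) (vis.set s.toNat t) m' (by omega)
        (by omega) hlen' hvis'
      refine ⟨⟨il, ?_⟩, ?_, ?_, ?_⟩
      · rw [ig0]
        simp only [PySem.List.pyGetD_zero, List.getD_eq_getElem?_getD]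
        rw [List.getElem?_set_ne (by omega)]
      · have : m ≤ m' := by rw [hm']; split_ifs <;> omega
        omega
      · intro j hj1 hj2
        rcases eq_or_lt_of_le hj1 with h | h
        · subst h
          have h6 : t ≤ m' := by rw [hm']; split_ifs <;> omega
          omega
        · exact icov j (by omega) hj2
      · rcases iatt with h | ⟨j, hj1, hj2, hj3⟩
        · rw [h, hm']
          split_ifs with hc
          · exact Or.inr ⟨s, le_refl _, hse, rfl⟩
          · exact Or.inl rfl
        · exact Or.inr ⟨j, by omega, hj2, hj3⟩

theorem pvA_outer_spec (arr : List Int) (a b : Int) (ha : 1 ≤ a) (hb : b ≤ (arr.length : Int))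
    (hne : arr ≠ []) :
    ∀ (k : Nat) (s : Int) (vis : List Int) (m : Int), (b + 1 - s).toNat ≤ k → a ≤ s →
    vis.length = arr.length →
    PySem.List.pyGetD vis 0 0 = pvP arr (s - 1) →
    m ≤ ((PySem.List.pyRange s (b + 1) 1).foldl (pvAOuter arr) (vis, m)).2 ∧
    (∀ i j, s ≤ i → i ≤ b → 0 ≤ j → j ≤ (arr.length : Int) - i →
      pvP arr (j + i) - pvP arr j ≤ ((PySem.List.pyRange s (b + 1) 1).foldl (pvAOuter arr) (vis, m)).2) ∧
    (((PySem.List.pyRange s (b + 1) 1).foldl (pvAOuter arr) (vis, m)).2 = m ∨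
      ∃ i j, s ≤ i ∧ i ≤ b ∧ 0 ≤ j ∧ j ≤ (arr.length : Int) - i ∧
        ((PySem.List.pyRange s (b + 1) 1).foldl (pvAOuter arr) (vis, m)).2 = pvP arr (j + i) - pvP arr j) := by
  have hN : 1 ≤ (arr.length : Int) := by
    have : arr.length ≠ 0 := by simpa using hne
    omega
  intro k
  induction k with
  | zero =>
    intro s vis m hk hs hlen hvis
    have : b + 1 ≤ s := by omega
    rw [PySem.List.pyRange_one_eq_nil this]
    exact ⟨le_refl _, fun i j h1 h2 _ _ => by omega, Or.inl rfl⟩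
  | succ k ih =>
    intro s vis m hk hs hlen hvis
    by_cases hse : b + 1 ≤ s
    · rw [PySem.List.pyRange_one_eq_nil hse]
      exact ⟨le_refl _, fun i j h1 h2 _ _ => by omega, Or.inl rfl⟩
    · have hsb : s ≤ b := by omega
      rw [PySem.List.pyRange_one_cons (by omega : s < b + 1), List.foldl_cons]
      -- the i = s step
      have ha1 : PySem.List.pyGetD arr (s - 1) 0 = pvP arr s - pvP arr (s - 1) := by
        have h := pvGet_eq arr (s - 1) (by omega) (by omega)
        have h2 : s - 1 + 1 = s := by ring
        rwa [h2] at h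
      have hstep : pvAOuter arr (vis, m) s =
          (PySem.List.pyRange 1 ((arr.length : Int) - s + 1) 1).foldl (pvAInner arr s)
            (vis.set 0 (pvP arr s), if pvP arr s > m then pvP arr s else m) := by
        unfold pvAOuter
        simp only [PySem.List.len_eq]
        rw [hvis, ha1, PySem.List.pySetD_of_nonneg _ _ (by omega)]
        have h4 : pvP arr (s - 1) + (pvP arr s - pvP arr (s - 1)) = pvP arr s := by ring
        rw [h4]
        rfl
      rw [hstep]
      set t := pvP arr s with ht
      set m' := if t > m then t else m with hm'
      have hlen' : (vis.set 0 t).length = arr.length := by simp [hlen]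
      have hvis1 : PySem.List.pyGetD (vis.set 0 t) (1 - 1) 0 = pvP arr (1 - 1 + s) - pvP arr (1 - 1) := by
        have h5 : (1 : Int) - 1 = 0 := by ring
        rw [h5]
        have h6 : (0 : Int) + s = s := by ring
        rw [h6, pvP_zero]
        rw [PySem.List.pyGetD_eq_getElem _ _ (by omega) (by rw [Nat.cast_inj.mpr hlen'] at *; omega)]
        simp only [Int.toNat_zero]
        rw [List.getElem_set_self]
        omega
      obtain ⟨⟨il, ig0⟩, imono, icov, iatt⟩ := pvA_inner_spec arr s (by omega)
        ((arr.length : Int) - s + 1) (by omega) ((arr.length : Int) - s + 1 - 1).toNat 1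
        (vis.set 0 t) m' (by omega) (by omega) hlen' hvis1
      set inres := (PySem.List.pyRange 1 ((arr.length : Int) - s + 1) 1).foldl (pvAInner arr s)
        (vis.set 0 t, m') with hinres
      have hg0' : PySem.List.pyGetD inres.1 0 0 = pvP arr (s + 1 - 1) := by
        have h7 : s + 1 - 1 = s := by ring
        rw [h7, ig0]
        rw [PySem.List.pyGetD_eq_getElem _ _ (by omega) (by rw [Nat.cast_inj.mpr hlen'] at *; omega)]
        simp only [Int.toNat_zero]
        rw [List.getElem_set_self]
      obtain ⟨omono, ocov, oatt⟩ := ih (s + 1) inres.1 inres.2 (by omega) (by omega) il hg0'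
      simp only [Prod.mk.eta] at omono ocov oatt
      have hmm' : m ≤ m' := by rw [hm']; split_ifs <;> omega
      have htm' : t ≤ m' := by rw [hm']; split_ifs <;> omega
      refine ⟨by omega, ?_, ?_⟩
      · intro i j hi1 hi2 hj1 hj2
        rcases eq_or_lt_of_le hi1 with h | h
        · subst h
          rcases eq_or_lt_of_le hj1 with h2 | h2
          · -- j = 0 : covered by t
            rw [← h2]
            have h8 : pvP arr (0 + s) - pvP arr 0 = t := by
              rw [pvP_zero]
              have h9 : (0:Int) + s = s := by ring
              rw [h9]
              omega
            omega
          · -- 1 ≤ j : covered by inner loop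
            have := icov j (by omega) (by omega)
            omega
        · exact ocov i j (by omega) hi2 hj1 hj2
      · rcases oatt with h | ⟨i, j, h1, h2, h3, h4, h5⟩
        · rcases iatt with h2 | ⟨j, hj1, hj2, hj3⟩
          · rw [h, h2, hm']
            split_ifs with hc
            · refine Or.inr ⟨s, 0, le_refl _, hsb, le_refl _, by omega, ?_⟩
              rw [pvP_zero]
              have h6 : (0:Int) + s = s := by ring
              rw [h6]
              omega
            · exact Or.inl rfl
          · refine Or.inr ⟨s, j, le_refl _, hsb, by omega, by omega, ?_⟩
            rw [h]
            exact hj3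
        · exact Or.inr ⟨i, j, by omega, h2, h3, h4, h5⟩

theorem pvA_good (arr : List Int) (a b : Int) (hpre : Pre_maxSubarrSum arr a b) :
    pvGood arr a b (maxSubarrSum arr a b) := by
  obtain ⟨hne, hcase⟩ := hpre
  have hN : 1 ≤ (arr.length : Int) := by
    have : arr.length ≠ 0 := by simpa using hne
    omega
  rw [pvA_eq_fold]
  rcases Int.lt_or_le b a with hba | hab
  · rw [PySem.List.pyRange_one_eq_nil (by omega : b + 1 ≤ a)]
    simp only [List.foldl_nil]
    exact ⟨le_refl _, fun l r hc => by exfalso; obtain ⟨h1, h2, h3, h4⟩ := hc; omega, Or.inl rfl⟩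
  · have hb : b ≤ (arr.length : Int) := by
      rcases hcase with h | ⟨_, h⟩
      · omega
      · exact h
    have ha : 1 ≤ a := by
      rcases hcase with h | ⟨h, _⟩
      · omega
      · exact h
    have hlen0 : (PySem.List.pySetD ((PySem.List.pyRange 0 (PySem.List.len arr) 1).map
        (fun (_ : Int) => (0:Int))) 0 ((PySem.List.slice arr none (some (a - 1))).sum)).length
        = arr.length := by
      rw [PySem.List.pySetD_of_nonneg _ _ (by omega)]
      simp [PySem.List.length_pyRange_one]
    have htot : (PySem.List.slice arr none (some (a - 1))).sum = pvP arr (a - 1) := by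
      rw [PySem.List.slice_to _ (by omega)]
      rfl
    have hvis0 : PySem.List.pyGetD (PySem.List.pySetD ((PySem.List.pyRange 0 (PySem.List.len arr) 1).map
        (fun (_ : Int) => (0:Int))) 0 ((PySem.List.slice arr none (some (a - 1))).sum)) 0 0
        = pvP arr (a - 1) := by
      rw [PySem.List.pySetD_of_nonneg _ _ (by omega), PySem.List.pyGetD_zero]
      simp only [Int.toNat_zero]
      rw [List.getD_eq_getElem _ _ (by simp [PySem.List.length_pyRange_one]; omega)]
      rw [List.getElem_set_self]
      exact htot
    obtain ⟨mono, cov, att⟩ := pvA_outer_spec arr a b ha hb hne (b + 1 - a).toNat a _ (-100001)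
      (le_refl _) (le_refl _) hlen0 hvis0
    refine ⟨mono, ?_, ?_⟩
    · intro l r hc
      obtain ⟨h1, h2, h3, h4⟩ := hc
      have := cov (r - l) l h2 h3 h1 (by omega)
      have hrl : l + (r - l) = r := by ring
      rwa [hrl] at this
    · rcases att with h | ⟨i, j, h1, h2, h3, h4, h5⟩
      · exact Or.inl h
      · exact Or.inr ⟨j, j + i, ⟨h3, by omega, by omega, by omega⟩, h5⟩

-- ----- B side -----


def pvBStep (a b : Int) (pref : List Int) (st : List Int × Nat × Int) (r : Int) :
    List Int × Nat × Int :=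
  let l := r - a
  let dq :=
    if 0 ≤ l then
      pvPopBack pref (PySem.List.pyGetD pref l 0) st.2.1 st.1.length st.1 ++ [l]
    else st.1
  let head := pvAdvance dq (r - b) dq.length st.2.1
  let best :=
    if head < dq.length then
      let s := PySem.List.pyGetD pref r 0 -
        PySem.List.pyGetD pref (PySem.List.pyGetD dq (head : Int) 0) 0
      if s > st.2.2 then s else st.2.2
    else st.2.2
  (dq, head, best)

theorem pvB_eq_fold (arr : List Int) (a b : Int) :
    maxSubarrSum_alt arr a b =
      ((PySem.List.pyRange 1 ((arr.length : Int) + 1) 1).foldl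
        (pvBStep a b (arr.foldl (fun p x => p ++ [PySem.List.pyGetD p (-1) 0 + x]) [0]))
        ([], 0, -100001)).2.2 := rfl

theorem pv_pref_aux (xs : List Int) : ∀ (base : List Int) (c : Int),
    xs.foldl (fun p x => p ++ [PySem.List.pyGetD p (-1) 0 + x]) (base ++ [c]) =
      base ++ (List.range (xs.length + 1)).map (fun k => c + (xs.take k).sum) := by
  induction xs with
  | nil => intro base c; simp
  | cons x t ih =>
    intro base c
    simp only [List.foldl_cons, PySem.List.pyGetD_neg_one_append_singleton]
    have h : base ++ [c] ++ [c + x] = (base ++ [c]) ++ [c + x] := by simp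
    rw [h, ih (base ++ [c]) (c + x)]
    simp only [List.length_cons, List.range_succ_eq_map, List.map_cons, List.map_map]
    simp [Function.comp_def, List.append_assoc]
    intro a _
    ring

theorem pv_pref_get (arr : List Int) (k : Int) (h0 : 0 ≤ k) (hk : k ≤ (arr.length : Int)) :
    PySem.List.pyGetD (arr.foldl (fun p x => p ++ [PySem.List.pyGetD p (-1) 0 + x]) [0]) k 0 =
      pvP arr k := by
  have h := pv_pref_aux arr [] 0
  simp only [List.nil_append] at h
  rw [h]
  have hk' : k.toNat < arr.length + 1 := by omega
  have h2 := PySem.List.pyGetD_eq_getElem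
    (xs := (List.range (arr.length + 1)).map (fun k => (0:Int) + (arr.take k).sum)) (d := 0) h0
    (by simpa using hk')
  rw [h2]
  simp [pvP]

theorem pvPopBack_spec (pref : List Int) (pl : Int) (head : Nat) :
    ∀ (fuel : Nat) (dq : List Int), dq.length ≤ fuel + head → head ≤ dq.length →
    ∃ kept dropped, dq = kept ++ dropped ∧
      pvPopBack pref pl head fuel dq = kept ∧
      head ≤ kept.length ∧
      (∀ d ∈ dropped, pl ≤ PySem.List.pyGetD pref d 0) ∧
      (kept.length = head ∨ ∃ hne : kept ≠ [], PySem.List.pyGetD pref (kept.getLast hne) 0 < pl) := by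
  intro fuel
  induction fuel with
  | zero =>
    intro dq hf hh
    exact ⟨dq, [], by simp, rfl, hh, by simp, Or.inl (by omega)⟩
  | succ fuel ih =>
    intro dq hf hh
    rw [pvPopBack]
    by_cases hc : head < dq.length ∧ pl ≤ PySem.List.pyGetD pref (PySem.List.pyGetD dq (-1) 0) 0
    · rw [if_pos hc]
      have hne : dq ≠ [] := by intro h; subst h; simp at hc
      have hlen : dq.dropLast.length = dq.length - 1 := by simp
      obtain ⟨kept, dropped, h1, h2, h3, h4, h5⟩ := ih dq.dropLast (by omega) (by omega)
      refine ⟨kept, dropped ++ [dq.getLast hne], ?_, h2, h3, ?_, h5⟩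
      · rw [← List.append_assoc, ← h1, List.dropLast_append_getLast hne]
      · intro d hd
        rcases List.mem_append.1 hd with hd | hd
        · exact h4 d hd
        · simp at hd
          subst hd
          have := hc.2
          rwa [PySem.List.pyGetD_neg_one dq 0 hne] at this
    · rw [if_neg hc]
      refine ⟨dq, [], by simp, rfl, hh, by simp, ?_⟩
      rcases Nat.lt_or_ge head dq.length with h | h
      · have hne : dq ≠ [] := by intro hx; subst hx; simp at h
        right
        refine ⟨hne, ?_⟩
        have : ¬ pl ≤ PySem.List.pyGetD pref (PySem.List.pyGetD dq (-1) 0) 0 := by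
          intro hx; exact hc ⟨h, hx⟩
        rw [PySem.List.pyGetD_neg_one dq 0 hne] at this
        omega
      · left; omega

theorem pvAdvance_spec (dq : List Int) (cut : Int) :
    ∀ (fuel : Nat) (head : Nat), dq.length ≤ fuel + head → head ≤ dq.length →
    head ≤ pvAdvance dq cut fuel head ∧
    pvAdvance dq cut fuel head ≤ dq.length ∧
    (∀ idx (hh : idx < dq.length), head ≤ idx → idx < pvAdvance dq cut fuel head → dq[idx] < cut) ∧
    (pvAdvance dq cut fuel head = dq.length ∨
      ∃ hh : pvAdvance dq cut fuel head < dq.length, cut ≤ dq[pvAdvance dq cut fuel head]) := by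
  intro fuel
  induction fuel with
  | zero =>
    intro head hf hh
    rw [pvAdvance]
    exact ⟨le_refl _, hh, by omega, Or.inl (by omega)⟩
  | succ fuel ih =>
    intro head hf hh
    rw [pvAdvance]
    by_cases hc : head < dq.length ∧ PySem.List.pyGetD dq (head : Int) 0 < cut
    · rw [if_pos hc]
      obtain ⟨i1, i2, i3, i4⟩ := ih (head + 1) (by omega) (by omega)
      refine ⟨by omega, i2, ?_, i4⟩
      intro idx hidx h1 h2
      rcases Nat.eq_or_lt_of_le h1 with h | h
      · subst h
        have h2 := hc.2
        simp only [PySem.List.pyGetD_natCast] at h2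
        rwa [List.getD_eq_getElem dq 0 (by omega)] at h2
      · exact i3 idx hidx (by omega) h2
    · rw [if_neg hc]
      refine ⟨le_refl _, hh, by omega, ?_⟩
      rcases Nat.lt_or_ge head dq.length with h | h
      · right
        refine ⟨h, ?_⟩
        have h2 : ¬ PySem.List.pyGetD dq (head : Int) 0 < cut := fun hx => hc ⟨h, hx⟩
        simp only [PySem.List.pyGetD_natCast] at h2
        rw [List.getD_eq_getElem dq 0 (by omega)] at h2
        omega
      · left; omega

theorem pv_pairwise_map_le_getLast (f : Int → Int) :
    ∀ (xs : List Int) (hne : xs ≠ []), ((xs.map f).Pairwise (· < ·)) →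
    ∀ x ∈ xs, f x ≤ f (xs.getLast hne) := by
  intro xs
  induction xs with
  | nil => simp
  | cons y ys ih =>
    intro hne hp x hx
    cases ys with
    | nil =>
      simp at hx
      subst hx
      simp
    | cons z t =>
      rw [List.getLast_cons (by simp)]
      rw [List.map_cons, List.pairwise_cons] at hp
      obtain ⟨hhead, htail⟩ := hp
      rcases List.mem_cons.1 hx with rfl | hx'
      · have hmem : (z :: t).getLast (by simp) ∈ z :: t := List.getLast_mem _
        have := hhead (f ((z :: t).getLast (by simp))) (List.mem_map_of_mem hmem)
        omega
      · exact ih (by simp) htail x hx'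

theorem pv_getLast_drop (xs : List Int) (n : Nat) (h : xs.drop n ≠ []) (h2 : xs ≠ []) :
    xs.getLast h2 = (xs.drop n).getLast h := by
  have h3 : (xs.drop n).getLast? = xs.getLast? := by
    conv_rhs => rw [← List.take_append_drop n xs]
    rw [List.getLast?_append, List.getLast?_eq_some_getLast h]
    rfl
  rw [List.getLast?_eq_some_getLast h, List.getLast?_eq_some_getLast h2] at h3
  exact (Option.some_inj.1 h3).symm

theorem pv_mem_head_le (f : Int → Int) (xs : List Int) (x : Int) (hx : x ∈ xs)
    (hp : (xs.map f).Pairwise (· < ·)) (y : Int) (hhead : xs.head? = some y) :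
    f y ≤ f x := by
  cases xs with
  | nil => simp at hx
  | cons z t =>
    simp at hhead
    subst hhead
    rw [List.map_cons, List.pairwise_cons] at hp
    rcases List.mem_cons.1 hx with rfl | hx'
    · exact le_refl _
    · exact le_of_lt (hp.1 (f x) (List.mem_map_of_mem hx'))

def pvBInv (arr : List Int) (a b : Int) (pref : List Int) (r : Int) (st : List Int × Nat × Int) : Prop :=
  st.2.1 ≤ st.1.length ∧
  (∀ d ∈ st.1.drop st.2.1, 0 ≤ d ∧ d ≤ r - 1 - a) ∧
  (st.1.drop st.2.1).Pairwise (· < ·) ∧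
  ((st.1.drop st.2.1).map (fun d => PySem.List.pyGetD pref d 0)).Pairwise (· < ·) ∧
  (∀ l, 0 ≤ l → r - 1 - b ≤ l → l ≤ r - 1 - a →
    ∃ d ∈ st.1.drop st.2.1, l ≤ d ∧
      PySem.List.pyGetD pref d 0 ≤ PySem.List.pyGetD pref l 0) ∧
  -100001 ≤ st.2.2 ∧
  (∀ l r', pvCand (arr.length : Int) a b l r' → r' < r → pvP arr r' - pvP arr l ≤ st.2.2) ∧
  (st.2.2 = -100001 ∨ ∃ l r', pvCand (arr.length : Int) a b l r' ∧ st.2.2 = pvP arr r' - pvP arr l)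

theorem pvB_step (arr : List Int) (a b : Int) (pref : List Int)
    (hpref : ∀ k : Int, 0 ≤ k → k ≤ (arr.length : Int) → PySem.List.pyGetD pref k 0 = pvP arr k)
    (hab : b < a ∨ 1 ≤ a) (r : Int) (hr : 1 ≤ r) (hrN : r ≤ (arr.length : Int))
    (st : List Int × Nat × Int) (hinv : pvBInv arr a b pref r st) :
    pvBInv arr a b pref (r + 1) (pvBStep a b pref st r) := by
  obtain ⟨I1, I2, I3, I4, I5, I6, I7, I8⟩ := hinv
  set dq1 := (if 0 ≤ r - a then
      pvPopBack pref (PySem.List.pyGetD pref (r - a) 0) st.2.1 st.1.length st.1 ++ [r - a]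
    else st.1) with hdq1
  set h0 := st.2.1 with hh0
  -- push-phase facts
  have hP : h0 ≤ dq1.length ∧
      (∀ d ∈ dq1.drop h0, 0 ≤ d ∧ d ≤ r - a) ∧
      (dq1.drop h0).Pairwise (· < ·) ∧
      ((dq1.drop h0).map (fun d => PySem.List.pyGetD pref d 0)).Pairwise (· < ·) ∧
      (∀ l0, 0 ≤ l0 → r - b ≤ l0 → l0 ≤ r - a →
        ∃ d ∈ dq1.drop h0, l0 ≤ d ∧
          PySem.List.pyGetD pref d 0 ≤ PySem.List.pyGetD pref l0 0) := by
    by_cases hla : 0 ≤ r - a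
    · rw [hdq1, if_pos hla]
      obtain ⟨kept, dropped, hsplit, hpop, hkh, hdropped, hstop⟩ :=
        pvPopBack_spec pref (PySem.List.pyGetD pref (r - a) 0) h0 st.1.length st.1
          (by omega) I1
      rw [hpop]
      have hact0 : st.1.drop h0 = kept.drop h0 ++ dropped := by
        rw [hsplit, List.drop_append_of_le_length hkh]
      have hkd_sub : (kept.drop h0).Sublist (st.1.drop h0) := by
        rw [hact0]; exact List.sublist_append_left _ _
      have hkd_mem : ∀ d ∈ kept.drop h0, d ∈ st.1.drop h0 := fun d hd => hkd_sub.subset hd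
      have hdrop_app : (kept ++ [r - a]).drop h0 = kept.drop h0 ++ [r - a] :=
        List.drop_append_of_le_length hkh
      have hP4kd : ((kept.drop h0).map (fun d => PySem.List.pyGetD pref d 0)).Pairwise (· < ·) :=
        List.Pairwise.sublist (hkd_sub.map _) I4
      refine ⟨by simp; omega, ?_, ?_, ?_, ?_⟩
      · rw [hdrop_app]
        intro d hd
        rcases List.mem_append.1 hd with hd | hd
        · have := I2 d (hkd_mem d hd); omega
        · simp at hd; omega
      · rw [hdrop_app]
        apply List.pairwise_append.2
        refine ⟨List.Pairwise.sublist hkd_sub I3, List.pairwise_singleton _ _, ?_⟩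
        intro x hx y hy
        simp at hy
        subst hy
        have := I2 x (hkd_mem x hx)
        omega
      · rw [hdrop_app, List.map_append]
        apply List.pairwise_append.2
        refine ⟨hP4kd, by simp, ?_⟩
        intro x hx y hy
        simp at hy
        subst hy
        obtain ⟨x0, hx0, rfl⟩ := List.mem_map.1 hx
        rcases hstop with hlen | ⟨hne, hlast⟩
        · have hnil : kept.drop h0 = [] := by
            apply List.drop_eq_nil_of_le; omega
          rw [hnil] at hx0; simp at hx0
        · have hkdne : kept.drop h0 ≠ [] := by intro hq; rw [hq] at hx0; simp at hx0
          have hle := pv_pairwise_map_le_getLast _ (kept.drop h0) hkdne hP4kd x0 hx0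
          have hgl : kept.getLast hne = (kept.drop h0).getLast hkdne :=
            pv_getLast_drop kept h0 hkdne hne
          rw [hgl] at hlast
          omega
      · intro l0 hl0 hlb hla2
        rcases eq_or_lt_of_le hla2 with heq | hlt
        · subst heq
          refine ⟨r - a, ?_, by omega, by omega⟩
          rw [hdrop_app]; simp
        · obtain ⟨d, hd, hld, hprd⟩ := I5 l0 hl0 (by omega) (by omega)
          rw [hact0] at hd
          rcases List.mem_append.1 hd with hd' | hd'
          · exact ⟨d, by rw [hdrop_app]; exact List.mem_append_left _ hd', hld, hprd⟩
          · have hpl := hdropped d hd'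
            refine ⟨r - a, by rw [hdrop_app]; simp, by omega, by omega⟩
    · rw [hdq1, if_neg hla]
      refine ⟨I1, ?_, I3, I4, ?_⟩
      · intro d hd; have := I2 d hd; omega
      · intro l0 hl0 _ hla2; exfalso; omega
  obtain ⟨P1, P2, P3, P4, P5⟩ := hP
  set hd1 := pvAdvance dq1 (r - b) dq1.length h0 with hhd1
  obtain ⟨A1, A2, A3, A4⟩ := pvAdvance_spec dq1 (r - b) dq1.length h0 (by omega) P1
  have hdrop2 : dq1.drop hd1 = (dq1.drop h0).drop (hd1 - h0) := by
    rw [List.drop_drop]; congr 1; omega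
  have hsub2 : (dq1.drop hd1).Sublist (dq1.drop h0) := by
    rw [hdrop2]; exact List.drop_sublist _ _
  have Q2 : ∀ d ∈ dq1.drop hd1, 0 ≤ d ∧ d ≤ r - a := fun d hd => P2 d (hsub2.subset hd)
  have Q3 : (dq1.drop hd1).Pairwise (· < ·) := List.Pairwise.sublist hsub2 P3
  have Q4 : ((dq1.drop hd1).map (fun d => PySem.List.pyGetD pref d 0)).Pairwise (· < ·) :=
    List.Pairwise.sublist (hsub2.map _) P4
  have Qmem : ∀ d ∈ dq1.drop h0, r - b ≤ d → d ∈ dq1.drop hd1 := by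
    intro d hd hdb
    obtain ⟨j, hj, hjd⟩ := List.mem_iff_getElem.1 hd
    have hjlen : h0 + j < dq1.length := by
      have := hj; simp only [List.length_drop] at this; omega
    have hIdx : (dq1.drop h0)[j] = dq1[h0 + j]'hjlen := List.getElem_drop
    rw [hIdx] at hjd
    by_cases hcase : h0 + j < hd1
    · exfalso
      have := A3 (h0 + j) hjlen (by omega) hcase
      omega
    · rw [List.mem_iff_getElem]
      refine ⟨h0 + j - hd1, by simp only [List.length_drop]; omega, ?_⟩
      rw [List.getElem_drop]
      have h9 : hd1 + (h0 + j - hd1) = h0 + j := by omega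
      simp only [h9]
      exact hjd
  have Q5 : ∀ l0, 0 ≤ l0 → r - b ≤ l0 → l0 ≤ r - a →
      ∃ d ∈ dq1.drop hd1, l0 ≤ d ∧
        PySem.List.pyGetD pref d 0 ≤ PySem.List.pyGetD pref l0 0 := by
    intro l0 hl0 hlb hla2
    obtain ⟨d, hd, hld, hprd⟩ := P5 l0 hl0 hlb hla2
    exact ⟨d, Qmem d hd (by omega), hld, hprd⟩
  -- query phase
  have hgoal : pvBStep a b pref st r =
      (dq1, hd1,
        if hd1 < dq1.length then
          if PySem.List.pyGetD pref r 0 -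
              PySem.List.pyGetD pref (PySem.List.pyGetD dq1 (hd1 : Int) 0) 0 > st.2.2 then
            PySem.List.pyGetD pref r 0 -
              PySem.List.pyGetD pref (PySem.List.pyGetD dq1 (hd1 : Int) 0) 0
          else st.2.2
        else st.2.2) := rfl
  rw [hgoal]
  unfold pvBInv
  simp only
  by_cases hq : hd1 < dq1.length
  · -- the deque is nonempty after the advance: the front is queried
    rw [if_pos hq]
    have hfget : PySem.List.pyGetD dq1 (hd1 : Int) 0 = dq1[hd1] := by
      simp only [PySem.List.pyGetD_natCast]
      exact List.getD_eq_getElem dq1 0 hq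
    have hfmem : dq1[hd1] ∈ dq1.drop hd1 := by
      rw [List.drop_eq_getElem_cons hq]; exact List.mem_cons_self
    have hfb := Q2 _ hfmem
    have hfcut : r - b ≤ dq1[hd1] := by
      rcases A4 with h | ⟨hh, hcut⟩
      · omega
      · exact hcut
    have ha1 : 1 ≤ a := by
      rcases hab with h | h
      · exfalso; omega
      · exact h
    have hprf : PySem.List.pyGetD pref (dq1[hd1]) 0 = pvP arr (dq1[hd1]) :=
      hpref _ hfb.1 (by omega)
    have hprr : PySem.List.pyGetD pref r 0 = pvP arr r := hpref r (by omega) hrN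
    rw [hfget, hprf, hprr]
    have hcand : pvCand (arr.length : Int) a b (dq1[hd1]) r :=
      ⟨hfb.1, by omega, by omega, hrN⟩
    set sv := pvP arr r - pvP arr (dq1[hd1]) with hsv
    set best1 := if sv > st.2.2 then sv else st.2.2 with hbest1
    have hb1 : st.2.2 ≤ best1 ∧ sv ≤ best1 ∧ (best1 = st.2.2 ∨ best1 = sv) := by
      rw [hbest1]; split_ifs <;> exact ⟨by omega, by omega, by simp⟩
    refine ⟨A2, ?_, Q3, Q4, ?_, by omega, ?_, ?_⟩
    · intro d hd; have := Q2 d hd; omega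
    · intro l0 hl0 hlb hla2
      exact Q5 l0 hl0 (by omega) (by omega)
    · intro l0 r' hc hr'
      by_cases hr'' : r' < r
      · have := I7 l0 r' hc hr''; omega
      · have hrr : r' = r := by omega
        subst hrr
        obtain ⟨hc1, hc2, hc3, hc4⟩ := hc
        obtain ⟨d, hd, hld, hprd⟩ := Q5 l0 hc1 (by omega) (by omega)
        have hhead : (dq1.drop hd1).head? = some (dq1[hd1]) := by
          rw [List.drop_eq_getElem_cons hq]; rfl
        have hfd := pv_mem_head_le _ (dq1.drop hd1) d hd Q4 _ hhead
        have hprl0 : PySem.List.pyGetD pref l0 0 = pvP arr l0 := hpref l0 hc1 (by omega)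
        rw [hprf] at hfd
        rw [hprl0] at hprd
        omega
    · rcases hb1.2.2 with h | h
      · rcases I8 with h2 | ⟨l0, r', hc, hv⟩
        · exact Or.inl (by omega)
        · exact Or.inr ⟨l0, r', hc, by omega⟩
      · exact Or.inr ⟨dq1[hd1], r, hcand, by omega⟩
  · rw [if_neg hq]
    refine ⟨A2, ?_, Q3, Q4, ?_, I6, ?_, I8⟩
    · intro d hd; have := Q2 d hd; omega
    · intro l0 hl0 hlb hla2
      exact Q5 l0 hl0 (by omega) (by omega)
    · intro l0 r' hc hr'
      by_cases hr'' : r' < r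
      · exact I7 l0 r' hc hr''
      · exfalso
        have hrr : r' = r := by omega
        subst hrr
        obtain ⟨hc1, hc2, hc3, hc4⟩ := hc
        obtain ⟨d, hd, _, _⟩ := Q5 l0 hc1 (by omega) (by omega)
        have : dq1.drop hd1 ≠ [] := by intro h; rw [h] at hd; simp at hd
        have : hd1 < dq1.length := by
          by_contra hcon
          have : dq1.drop hd1 = [] := List.drop_eq_nil_of_le (by omega)
          tauto
        omega

theorem pvB_loop (arr : List Int) (a b : Int) (pref : List Int)
    (hpref : ∀ k : Int, 0 ≤ k → k ≤ (arr.length : Int) → PySem.List.pyGetD pref k 0 = pvP arr k)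
    (hab : b < a ∨ 1 ≤ a) :
    ∀ (k : Nat) (s : Int) (st : List Int × Nat × Int), ((arr.length : Int) + 1 - s).toNat ≤ k →
    1 ≤ s → s ≤ (arr.length : Int) + 1 →
    pvBInv arr a b pref s st →
    pvBInv arr a b pref ((arr.length : Int) + 1)
      ((PySem.List.pyRange s ((arr.length : Int) + 1) 1).foldl (pvBStep a b pref) st) := by
  intro k
  induction k with
  | zero =>
    intro s st hk hs1 hs2 hinv
    have hs : s = (arr.length : Int) + 1 := by omega
    subst hs
    rw [PySem.List.pyRange_one_eq_nil (le_refl _)]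
    exact hinv
  | succ k ih =>
    intro s st hk hs1 hs2 hinv
    rcases eq_or_lt_of_le hs2 with hs | hs
    · subst hs
      rw [PySem.List.pyRange_one_eq_nil (le_refl _)]
      exact hinv
    · rw [PySem.List.pyRange_one_cons hs, List.foldl_cons]
      exact ih (s + 1) _ (by omega) (by omega) (by omega)
        (pvB_step arr a b pref hpref hab s hs1 (by omega) st hinv)

theorem pvB_good (arr : List Int) (a b : Int) (hpre : Pre_maxSubarrSum arr a b) :
    pvGood arr a b (maxSubarrSum_alt arr a b) := by
  obtain ⟨hne, hcase⟩ := hpre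
  have hN : 1 ≤ (arr.length : Int) := by
    have : arr.length ≠ 0 := by simpa using hne
    omega
  have hab : b < a ∨ 1 ≤ a := by
    rcases hcase with h | ⟨h, _⟩
    · exact Or.inl h
    · exact Or.inr h
  rw [pvB_eq_fold]
  have hinit : pvBInv arr a b
      (arr.foldl (fun p x => p ++ [PySem.List.pyGetD p (-1) 0 + x]) [0]) 1 ([], 0, -100001) := by
    refine ⟨by simp, by simp, by simp, by simp, ?_, by norm_num, ?_, Or.inl rfl⟩
    · intro l0 h1 h2 h3
      exfalso
      rcases hab with h | h <;> omega
    · intro l0 r' hc hr'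
      exfalso
      obtain ⟨h1, h2, h3, h4⟩ := hc
      rcases hab with h | h <;> omega
  have hfin := pvB_loop arr a b _ (fun k h1 h2 => pv_pref_get arr k h1 h2) hab
    ((arr.length : Int)).toNat 1 ([], 0, -100001) (by omega) (by omega) (by omega) hinit
  obtain ⟨_, _, _, _, _, F6, F7, F8⟩ := hfin
  refine ⟨F6, ?_, F8⟩
  intro l r hc
  exact F7 l r hc (by obtain ⟨_, _, _, h4⟩ := hc; omega)

-- ===== VERDICT (by name: the statement is the Claim_ definition above) =====
theorem maxSubarrSum_spec : Claim_equal_maxSubarrSum := by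
  intro arr a b _ hpre
  unfold Spec_maxSubarrSum
  exact pvGood_unique (pvA_good arr a b hpre) (pvB_good arr a b hpre)

theorem maxSubarrSum_raises : Claim_raises_maxSubarrSum := by
  unfold Claim_raises_maxSubarrSum
  constructor
  · intro arr a b _ hr
    unfold Pre_maxSubarrSum
    rintro ⟨hne, hc⟩
    rcases hr with h | ⟨h1, h2⟩ | ⟨h1, h2, h3⟩
    · exact hne h
    · rcases hc with h | ⟨h4, _⟩ <;> omega
    · rcases hc with h | ⟨_, h4⟩ <;> omega
  · exact ⟨by decide, by decide, by decide⟩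

-- self-check: the disjointness half of the raises theorem, instantiated (kept usable on its own)
theorem pv_raises_outside_pre_ok (arr : List Int) (a b : Int) (hdom : Dom_maxSubarrSum arr a b)
    (hr : Raises_maxSubarrSum arr a b) : ¬ Pre_maxSubarrSum arr a b :=
  maxSubarrSum_raises.1 arr a b hdom hr
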